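-- pv_equiv track=rewrite | github.com/leideng/CANN-8.1.RC1 | Ascend/ascend-toolkit/8.1.RC1/opp/built-in/op_impl/ai_core/tbe/impl/confusion_transpose_d.py | _merge_perm
-- ===== SOURCE A (Python) =====
-- def _merge_perm(src_list, dst_list):
--     """
--     merge a perm accoding to a given shape
--
--     params:
--         src_list: the perm to be merged
--         dst_list: the given shape
--     return:
--         merged perm
--     """
--     len_list = []
--     result_list = []
--     for _, shape_list in enumerate(dst_list):
--         len_list.append(len(shape_list))
--
--     for index in len_list:
--         list_tmp = src_list[:index]
--         result_list.append(list_tmp)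
--         del src_list[:index]
--
--     return result_list
-- ===== SOURCE B (Python) =====
-- def _merge_perm(src_list, dst_list):
--     """
--     merge a perm accoding to a given shape
--
--     params:
--         src_list: the perm to be merged
--         dst_list: the given shape
--     return:
--         merged perm
--     """
--     offsets = [0]
--     for chunk in dst_list:
--         offsets.append(offsets[-1] + len(chunk))
--     result = [src_list[offsets[i]:offsets[i + 1]] for i in range(len(dst_list))]
--     del src_list[:offsets[-1]]
--     return result
-- ===== Notes on version B (the rewrite author's own statement) =====
-- stated objective: faster
-- what changed: B precomputes cumulative prefix offsets once and takes non-destructive slices src_list[start:end], deleting the consumed prefix a single time at the end, instead of A's repeated take-and-delete of the list front.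
import Mathlib
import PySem

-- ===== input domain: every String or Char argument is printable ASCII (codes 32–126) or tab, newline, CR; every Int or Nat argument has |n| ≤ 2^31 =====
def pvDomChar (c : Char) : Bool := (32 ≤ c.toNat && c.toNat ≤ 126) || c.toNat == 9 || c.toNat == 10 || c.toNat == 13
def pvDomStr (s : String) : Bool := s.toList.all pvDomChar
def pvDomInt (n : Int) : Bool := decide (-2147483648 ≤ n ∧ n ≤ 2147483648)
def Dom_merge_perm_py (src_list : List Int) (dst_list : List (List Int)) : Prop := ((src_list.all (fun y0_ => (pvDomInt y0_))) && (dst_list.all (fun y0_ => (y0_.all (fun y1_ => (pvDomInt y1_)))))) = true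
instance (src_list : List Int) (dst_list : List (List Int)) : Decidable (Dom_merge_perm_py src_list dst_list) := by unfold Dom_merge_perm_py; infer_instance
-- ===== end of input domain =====

-- B replaces A's repeated take-and-delete of the list front with precomputed prefix
-- offsets and non-destructive slices (one deletion at the end); return values proved
-- equal — both Pythons also leave src_list in the same mutated state (del of the
-- consumed prefix), which the pure ports do not model.

-- ===== PORT A =====
-- literal transliteration of A: first loop collects len(shape_list); second loop
-- takes src_list[:index] and executes del src_list[:index] (state = remaining src).
def merge_perm_py (src_list : List Int) (dst_list : List (List Int)) : List (List Int) :=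
  let len_list : List Int := dst_list.foldl (fun acc shape_list => acc ++ [(shape_list.length : Int)]) []
  let st := len_list.foldl
    (fun (st : List Int × List (List Int)) index =>
      let list_tmp := PySem.List.slice st.1 none (some index)
      (PySem.List.slice st.1 (some index) none, st.2 ++ [list_tmp]))
    (src_list, [])
  st.2

-- ===== PORT B =====
-- literal transliteration of B: build the offsets list, then map slices over range.
def merge_perm_py_alt (src_list : List Int) (dst_list : List (List Int)) : List (List Int) :=
  let offsets : List Int := dst_list.foldl (fun acc chunk => acc ++ [acc.getLastD 0 + (chunk.length : Int)]) [0]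
  (List.range dst_list.length).map (fun i =>
    PySem.List.slice src_list (some (offsets.getD i 0)) (some (offsets.getD (i + 1) 0)))

-- ===== PRECONDITION & SPEC =====
def Spec_merge_perm_py (src_list : List Int) (dst_list : List (List Int)) (out : List (List Int)) : Prop := out = merge_perm_py_alt src_list dst_list
instance (src_list : List Int) (dst_list : List (List Int)) (out : List (List Int)) : Decidable (Spec_merge_perm_py src_list dst_list out) := by unfold Spec_merge_perm_py; infer_instance

-- ===== CLAIM (what is proved, stated in full; the proofs are below) =====
def Claim_equal_merge_perm_py : Prop := ∀ (src_list : List Int) (dst_list : List (List Int)), Dom_merge_perm_py src_list dst_list → Spec_merge_perm_py src_list dst_list (merge_perm_py src_list dst_list)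

-- ===== LEMMAS AND PROOFS =====

-- common reference: split src into consecutive chunks of the given sizes
def pvChunks (src : List Int) : List Nat → List (List Int)
  | [] => []
  | n :: rest => src.take n :: pvChunks (src.drop n) rest

-- append-fold builds the map
theorem pvFoldAppend {α β : Type} (f : α → β) :
    ∀ (xs : List α) (acc : List β),
      xs.foldl (fun acc x => acc ++ [f x]) acc = acc ++ xs.map f := by
  intro xs
  induction xs with
  | nil => simp
  | cons x xs ih => intro acc; simp [List.foldl, ih]

-- A's second loop computes pvChunks
theorem pvFoldA :
    ∀ (ls : List Nat) (src : List Int) (acc : List (List Int)),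
      ((ls.map (fun n : Nat => (n : Int))).foldl
        (fun (st : List Int × List (List Int)) index =>
          let list_tmp := PySem.List.slice st.1 none (some index)
          (PySem.List.slice st.1 (some index) none, st.2 ++ [list_tmp]))
        (src, acc)).2 = acc ++ pvChunks src ls := by
  intro ls
  induction ls with
  | nil => simp [pvChunks]
  | cons n rest ih =>
    intro src acc
    simp only [List.map_cons, List.foldl_cons]
    rw [PySem.List.slice_to_natCast, PySem.List.slice_from_natCast, ih]
    simp [pvChunks]

-- B's offsets list, characterised
def pvOffs (t : Nat) : List Nat → List Int
  | [] => [(t : Int)]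
  | n :: rest => (t : Int) :: pvOffs (t + n) rest

theorem pvFoldB :
    ∀ (ls : List Nat) (pre : List Int) (t : Nat),
      (ls.map (fun n : Nat => (n : Int))).foldl
          (fun acc c => acc ++ [acc.getLastD 0 + c]) (pre ++ [(t : Int)])
        = pre ++ pvOffs t ls := by
  intro ls
  induction ls with
  | nil => intro pre t; simp [pvOffs]
  | cons n rest ih =>
    intro pre t
    simp only [List.map_cons, List.foldl_cons]
    have hl : (pre ++ [(t : Int)]).getLastD 0 = (t : Int) := by simp
    have hsh : pre ++ [(t : Int)] ++ [(t : Int) + (n : Int)]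
        = (pre ++ [(t : Int)]) ++ [((t + n : Nat) : Int)] := by
      push_cast; simp
    rw [hl, hsh, ih (pre ++ [(t : Int)]) (t + n)]
    simp [pvOffs]

-- slicing at consecutive offsets yields pvChunks
theorem pvSliceOffs :
    ∀ (ls : List Nat) (src : List Int) (j : Nat),
      (List.range ls.length).map (fun i =>
          PySem.List.slice src (some ((pvOffs j ls).getD i 0)) (some ((pvOffs j ls).getD (i + 1) 0)))
        = pvChunks (src.drop j) ls := by
  intro ls
  induction ls with
  | nil => simp [pvChunks]
  | cons n rest ih =>
    intro src j
    rw [show (n :: rest).length = rest.length + 1 from rfl, List.range_succ_eq_map]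
    simp only [List.map_cons, List.map_map]
    have h0 : (pvOffs j (n :: rest)).getD 0 0 = (j : Int) := by simp [pvOffs]
    have h1 : (pvOffs j (n :: rest)).getD 1 0 = (j : Int) + (n : Int) := by
      cases rest <;> simp [pvOffs]
    have step : ∀ i, ((fun i =>
          PySem.List.slice src (some ((pvOffs j (n :: rest)).getD i 0))
            (some ((pvOffs j (n :: rest)).getD (i + 1) 0))) ∘ (fun i => i + 1)) i
        = PySem.List.slice src (some ((pvOffs (j + n) rest).getD i 0))
            (some ((pvOffs (j + n) rest).getD (i + 1) 0)) := by
      intro i; simp [pvOffs]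
    rw [List.map_congr_left (fun i _ => step i), ih src (j + n)]
    show _ :: _ = _ :: _
    rw [h0, h1, PySem.List.slice_natCast_add]
    simp [List.drop_drop, Nat.add_comm]

-- ===== VERDICT (by name: the statement is the Claim_ definition above) =====
theorem merge_perm_py_spec : Claim_equal_merge_perm_py := by
  intro src dst _
  unfold Spec_merge_perm_py
  simp only [merge_perm_py, merge_perm_py_alt]
  have hmap : dst.map (fun sh : List Int => (sh.length : Int))
      = (dst.map List.length).map (fun n : Nat => (n : Int)) := by
    rw [List.map_map]; rfl
  -- A's side computes pvChunks src (dst.map List.length)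
  rw [pvFoldAppend (fun sh : List Int => (sh.length : Int)) dst [], List.nil_append,
    hmap, pvFoldA, List.nil_append]
  -- B's side too
  rw [← List.foldl_map (f := fun chunk : List Int => (chunk.length : Int))
      (g := fun acc c => acc ++ [acc.getLastD 0 + c]),
    show ([(0 : Int)] : List Int) = [] ++ [((0 : Nat) : Int)] from by simp,
    hmap, pvFoldB, List.nil_append,
    show dst.length = (dst.map List.length).length from (List.length_map ..).symm,
    pvSliceOffs, List.drop_zero]
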